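-- pv_equiv track=rewrite | github.com/Raphaelle3687/Arxiv-Classification | BayesNB.py | treatment
-- ===== SOURCE A (Python) =====
-- import string
--
-- def treatment(dataX):
-- 	''' Cleaning method in order to filer noise and unregularities'''
--
-- 	for i in range(len(dataX)):
-- 		text = dataX[i].split(" ")#splits each text by words delimited by spaces
-- 		text1=[]
-- 		for j in text:
-- 			#Here we check if there are uncaught spaces and resplit
-- 			if "\n" in j:
-- 				temp = j.split("\n")
-- 				for g in temp:
-- 					text1.append(g)
-- 			else:
-- 				text1.append(j)
--
-- 		text2=[]
-- 		for j in text1: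
-- 			if "-" in j:
-- 				#Here we check if the word is a hyphenated word and split it
-- 				temp = j.split("-")
-- 				for g in temp:
-- 					text2.append(g)
-- 			else:
-- 				text2.append(j)
--
-- 		text3=[]
-- 		for j in text2:
-- 			#list of non letter caracters
-- 			carToClean=string.punctuation
-- 			for car in carToClean:
-- 				#remove the unwanted caracter
-- 				j=j.replace(car, "")
-- 			text3.append(j)
--
--
-- 		text4=[]
-- 		for j in text3:
-- 			#only keeps words that are longer than 3 letters.
-- 			if len(j)>3:
-- 				text4.append(j)
--
-- 		dataX[i]=text4
--
-- 	return dataX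
-- ===== SOURCE B (Python) =====
-- import string
--
-- _PUNCT = set(string.punctuation)
-- _DELIM = " \n-"
--
-- def treatment(dataX):
--     for i in range(len(dataX)):
--         out = []
--         word = []
--         for ch in dataX[i]:
--             if ch in _DELIM:
--                 if len(word) > 3:
--                     out.append("".join(word))
--                 word = []
--             elif ch not in _PUNCT:
--                 word.append(ch)
--         if len(word) > 3:
--             out.append("".join(word))
--         dataX[i] = out
--     return dataX
-- ===== Notes on version B (the rewrite author's own statement) =====
-- stated objective: faster
-- what changed: A's four sequential passes per text (split on spaces, re-split on newlines, re-split on hyphens, then 32 str.replace calls per token plus a length filter) are replaced by one left-to-right character scan that maintains (finished words, current word), flushing on delimiters, skipping punctuation and keeping words longer than 3.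
import Mathlib
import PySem

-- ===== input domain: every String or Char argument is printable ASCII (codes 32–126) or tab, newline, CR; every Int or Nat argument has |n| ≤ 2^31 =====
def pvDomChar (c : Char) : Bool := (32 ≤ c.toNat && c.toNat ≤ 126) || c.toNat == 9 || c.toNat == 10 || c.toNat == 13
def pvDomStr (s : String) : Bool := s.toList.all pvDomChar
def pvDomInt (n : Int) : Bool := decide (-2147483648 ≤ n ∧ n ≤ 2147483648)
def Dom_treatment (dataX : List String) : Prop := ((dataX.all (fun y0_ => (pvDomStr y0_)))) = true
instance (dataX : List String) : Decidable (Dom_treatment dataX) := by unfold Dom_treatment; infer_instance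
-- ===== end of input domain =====

-- B replaces A's sequential passes (three split-accumulate loops, a per-token fold of str.replace
-- over all 32 punctuation characters, a length filter) by a single left-to-right character scan
-- maintaining (finished words, current word).
-- Both Pythons mutate dataX in place the same way; the equivalence proved here is about the return value.


-- string.punctuation (module-level constant both implementations read)
def pyPunctuation : List Char := "!\"#$%&'()*+,-./:;<=>?@[\\]^_`{|}~".toList

-- ===== PORT A =====
-- Python A mutates dataX[i] in place inside 'for i in range(len(dataX))'; as a pure function of
-- the returned value that index loop is the elementwise map below.  Python strings are carried as
-- List Char (PySem.Chars is the exact Python-string layer); [' '] = " ".toList etc.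
def treatment (dataX : List String) : List (List String) :=
  dataX.map (fun s =>
    let text := PySem.Chars.splitOn s.toList [' ']
    let text1 := text.foldl (fun acc j =>
      if PySem.Chars.isIn ['\n'] j then acc ++ PySem.Chars.splitOn j ['\n'] else acc ++ [j]) []
    let text2 := text1.foldl (fun acc j =>
      if PySem.Chars.isIn ['-'] j then acc ++ PySem.Chars.splitOn j ['-'] else acc ++ [j]) []
    let text3 := text2.foldl (fun acc j =>
      acc ++ [pyPunctuation.foldl (fun j car => PySem.Chars.replace j [car] []) j]) []
    let text4 := text3.foldl (fun acc j => if 3 < j.length then acc ++ [j] else acc) []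
    text4.map String.ofList)

-- ===== PORT B =====
def pvDelim : List Char := [' ', '\n', '-']  -- _DELIM = " \n-" (single-character membership test)

-- flush the current word: keep it iff len(word) > 3
def altFlush (out : List (List Char)) (word : List Char) : List (List Char) :=
  if 3 < word.length then out ++ [word] else out

-- one character of B's scan (membership in the set _PUNCT is exact on the distinct-element list)
def altStep (st : List (List Char) × List Char) (ch : Char) : List (List Char) × List Char :=
  if ch ∈ pvDelim then (altFlush st.1 st.2, [])
  else if ch ∈ pyPunctuation then st
  else (st.1, st.2 ++ [ch])

def treatment_alt (dataX : List String) : List (List String) :=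
  dataX.map (fun s =>
    let st := s.toList.foldl altStep ([], [])
    (altFlush st.1 st.2).map String.ofList)

-- ===== PRECONDITION & SPEC =====
def Spec_treatment (dataX : List String) (out : List (List String)) : Prop := out = treatment_alt dataX
instance (dataX : List String) (out : List (List String)) : Decidable (Spec_treatment dataX out) := by unfold Spec_treatment; infer_instance

-- ===== CLAIM (what is proved, stated in full; the proofs are below) =====
def Claim_equal_treatment : Prop := ∀ (dataX : List String), Dom_treatment dataX → Spec_treatment dataX (treatment dataX)

-- ===== LEMMAS AND PROOFS =====

-- proof-side vocabulary: the canonical single-pass splitter and the two filters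
def spA (p : Char → Bool) : List Char → List Char × List (List Char)
  | [] => ([], [])
  | c :: t =>
    let r := spA p t
    if p c then ([], r.1 :: r.2) else (c :: r.1, r.2)

def splitAny (p : Char → Bool) (l : List Char) : List (List Char) :=
  (spA p l).1 :: (spA p l).2

def pdelim (c : Char) : Bool := decide (c ∈ pvDelim)

def filt (j : List Char) : List Char := j.filter (fun x => !decide (x ∈ pyPunctuation))

def consW (w : List Char) (ls : List (List Char)) : List (List Char) :=
  match ls with
  | [] => [w]
  | x :: xs => (w ++ x) :: xs

def keepLong (ls : List (List Char)) : List (List Char) := ls.filter (fun j => 3 < j.length)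

-- j.replace(car, "") for a single character car deletes every occurrence of that character
lemma replace_go_single (c : Char) : ∀ (l : List Char) (fuel : Nat) (acc : List Char),
    l.length ≤ fuel →
    PySem.Chars.replace.go [c] [] fuel l acc = acc.reverse ++ l.filter (fun x => !(c == x)) := by
  intro l
  induction l with
  | nil =>
    intro fuel acc _
    cases fuel <;> simp [PySem.Chars.replace.go]
  | cons d t ih =>
    intro fuel acc h
    cases fuel with
    | zero => simp at h
    | succ f =>
      by_cases hc : (c == d) = true
      · simp [PySem.Chars.replace.go, List.isPrefixOf, hc, ih f acc (by simp at h; omega)]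
      · simp only [Bool.not_eq_true] at hc
        simp [PySem.Chars.replace.go, List.isPrefixOf, hc, ih f (d :: acc) (by simp at h; omega)]

lemma replace_single (c : Char) (l : List Char) :
    PySem.Chars.replace l [c] [] = l.filter (fun x => !(c == x)) := by
  simp [PySem.Chars.replace, replace_go_single c l l.length [] (le_refl _)]

-- folding single-character deletion over every punctuation character is one filter
lemma punct_fold (cars : List Char) : ∀ (j : List Char),
    cars.foldl (fun j car => PySem.Chars.replace j [car] []) j
      = j.filter (fun x => !(cars.any (fun c => c == x))) := by
  induction cars with
  | nil => intro j; simp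
  | cons c cs ih =>
    intro j
    rw [List.foldl_cons, ih, replace_single, List.filter_filter]
    apply List.filter_congr
    intro x _
    cases h : (c == x) <;> simp [h]

-- str.split on a single-character separator is the canonical splitter
lemma splitOn_go_single (d : Char) : ∀ (l : List Char) (fuel : Nat) (cur : List Char)
    (acc : List (List Char)), l.length < fuel →
    PySem.Chars.splitOn.go [d] fuel l cur acc =
      acc.reverse ++ (cur.reverse ++ (spA (fun c => d == c) l).1) :: (spA (fun c => d == c) l).2 := by
  intro l
  induction l with
  | nil =>
    intro fuel cur acc h
    cases fuel with
    | zero => omega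
    | succ f => simp [PySem.Chars.splitOn.go, spA]
  | cons e t ih =>
    intro fuel cur acc h
    cases fuel with
    | zero => omega
    | succ f =>
      by_cases hd : (d == e) = true
      · simp [PySem.Chars.splitOn.go, List.isPrefixOf, hd, spA,
          ih f [] (cur.reverse :: acc) (by simp at h ⊢; omega)]
      · simp only [Bool.not_eq_true] at hd
        simp [PySem.Chars.splitOn.go, List.isPrefixOf, hd, spA,
          ih f (e :: cur) acc (by simp at h ⊢; omega)]

lemma splitOn_single (l : List Char) (d : Char) :
    PySem.Chars.splitOn l [d] = splitAny (fun c => d == c) l := by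
  simp [PySem.Chars.splitOn, splitAny, splitOn_go_single d l (l.length + 1) [] [] (by omega)]

-- a token containing no separator splits into itself
lemma splitAny_nomem (p : Char → Bool) : ∀ (l : List Char), (∀ x ∈ l, p x = false) →
    splitAny p l = [l] := by
  intro l
  induction l with
  | nil => intro _; simp [splitAny, spA]
  | cons c t ih =>
    intro h
    have ht := ih (fun x hx => h x (List.mem_cons_of_mem c hx))
    simp only [splitAny, List.cons.injEq] at ht
    obtain ⟨h1, h2⟩ := ht
    simp [splitAny, spA, h c List.mem_cons_self, h1, h2]

-- re-splitting every piece by a second separator = splitting once by the union of separators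
lemma flatMap_splitAny (p q : Char → Bool) : ∀ (l : List Char),
    (splitAny p l).flatMap (splitAny q) = splitAny (fun c => p c || q c) l := by
  intro l
  induction l with
  | nil => simp [splitAny, spA]
  | cons c t ih =>
    have ihl : splitAny q (spA p t).1 ++ List.flatMap (splitAny q) (spA p t).2
        = (spA (fun c => p c || q c) t).1 :: (spA (fun c => p c || q c) t).2 := by
      simpa [splitAny, List.flatMap_cons] using ih
    by_cases hp : p c = true
    · have h1 : splitAny p (c :: t) = [] :: splitAny p t := by simp [splitAny, spA, hp]
      have h2 : splitAny (fun c => p c || q c) (c :: t)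
          = [] :: splitAny (fun c => p c || q c) t := by simp [splitAny, spA, hp]
      rw [h1, h2, List.flatMap_cons]
      simpa [splitAny, spA, List.flatMap_cons] using ih
    · simp only [Bool.not_eq_true] at hp
      have h1 : splitAny p (c :: t) = (c :: (spA p t).1) :: (spA p t).2 := by
        simp [splitAny, spA, hp]
      by_cases hq : q c = true
      · have h2 : splitAny (fun c => p c || q c) (c :: t)
            = [] :: (spA (fun c => p c || q c) t).1 :: (spA (fun c => p c || q c) t).2 := by
          simp [splitAny, spA, hp, hq]
        have h3 : splitAny q (c :: (spA p t).1) = [] :: splitAny q (spA p t).1 := by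
          simp [splitAny, spA, hq]
        show List.flatMap (splitAny q) (splitAny p (c :: t)) = _
        rw [h1, h2, List.flatMap_cons, h3]
        simp only [List.cons_append, ihl]
      · simp only [Bool.not_eq_true] at hq
        have h2 : splitAny (fun c => p c || q c) (c :: t)
            = (c :: (spA (fun c => p c || q c) t).1) :: (spA (fun c => p c || q c) t).2 := by
          simp [splitAny, spA, hp, hq]
        have h3 : splitAny q (c :: (spA p t).1)
            = (c :: (spA q (spA p t).1).1) :: (spA q (spA p t).1).2 := by
          simp [splitAny, spA, hq]
        have ihl' : (spA q (spA p t).1).1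
              :: ((spA q (spA p t).1).2 ++ List.flatMap (splitAny q) (spA p t).2)
            = (spA (fun c => p c || q c) t).1 :: (spA (fun c => p c || q c) t).2 := by
          simpa [splitAny, List.cons_append] using ihl
        obtain ⟨e1, e2⟩ := List.cons.injEq .. ▸ ihl'
        show List.flatMap (splitAny q) (splitAny p (c :: t)) = _
        rw [h1, h2, List.flatMap_cons, h3]
        simp only [List.cons_append, e1, e2]

-- A's 'if "\n" in j: resplit else keep' loop body, as one append of a split (ditto for "-")
lemma split_branch (d : Char) :
    (fun (acc : List (List Char)) (j : List Char) =>
        if PySem.Chars.isIn [d] j then acc ++ PySem.Chars.splitOn j [d] else acc ++ [j])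
      = (fun acc j => acc ++ splitAny (fun c => d == c) j) := by
  funext acc j
  by_cases hin : PySem.Chars.isIn [d] j = true
  · rw [if_pos hin, splitOn_single]
  · rw [if_neg (by simp [hin])]
    have hmem : d ∉ j := by
      intro hd
      exact hin ((PySem.Chars.isIn_iff_infix [d] j).mpr ((List.singleton_infix_iff d j).mpr hd))
    rw [splitAny_nomem _ j (fun x hx => by
      cases h : (d == x)
      · rfl
      · exact absurd (beq_iff_eq.mp h ▸ hx) hmem)]

-- A's punctuation-stripping loop body, as one append of the filter
lemma punct_branch :
    (fun (acc : List (List Char)) (j : List Char) =>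
        acc ++ [pyPunctuation.foldl (fun j car => PySem.Chars.replace j [car] []) j])
      = (fun acc j => acc ++ [filt j]) := by
  funext acc j
  rw [punct_fold]
  simp only [filt, List.any_beq', List.contains_eq_mem]

-- A's length-filter loop is keepLong
lemma keep_foldl (l : List (List Char)) (acc : List (List Char)) :
    l.foldl (fun acc j => if 3 < j.length then acc ++ [j] else acc) acc = acc ++ keepLong l := by
  have h := PySem.List.foldl_append_if (fun j : List Char => decide (3 < j.length)) id l acc
  simpa [keepLong] using h

-- A's three separators, united, are B's delimiter test
lemma pdelim_eq : (fun c => ((' ' == c) || ('\n' == c)) || ('-' == c)) = pdelim := by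
  funext c
  by_cases h1 : c = ' ' <;> by_cases h2 : c = '\n' <;> by_cases h3 : c = '-' <;>
    simp [pdelim, pvDelim, h1, h2, h3, Bool.beq_comm]

-- invariant of B's scan
lemma alt_inv : ∀ (cs : List Char) (out : List (List Char)) (word : List Char),
    altFlush (cs.foldl altStep (out, word)).1 (cs.foldl altStep (out, word)).2
      = out ++ keepLong (consW word ((splitAny pdelim cs).map filt)) := by
  intro cs
  induction cs with
  | nil =>
    intro out word
    simp only [List.foldl_nil, splitAny, spA, List.map_cons, List.map_nil, consW, keepLong,
      altFlush, filt, List.filter_nil, List.append_nil]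
    split_ifs <;> simp_all
  | cons c t ih =>
    intro out word
    simp only [List.foldl_cons]
    by_cases hd : c ∈ pvDelim
    · have hstep : altStep (out, word) c = (altFlush out word, []) := by simp [altStep, hd]
      rw [hstep, ih]
      have hsplit : splitAny pdelim (c :: t) = [] :: splitAny pdelim t := by
        simp [splitAny, spA, pdelim, hd]
      rw [hsplit]
      have hK : consW [] (List.map filt (splitAny pdelim t)) = List.map filt (splitAny pdelim t) := by
        simp [splitAny, consW]
      rw [hK]
      by_cases hw : 3 < word.length <;>
        simp [consW, keepLong, altFlush, hw, splitAny, filt, List.filter_cons, List.append_assoc]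
    · have hsplit : splitAny pdelim (c :: t)
          = (c :: (spA pdelim t).1) :: (spA pdelim t).2 := by
        simp [splitAny, spA, pdelim, hd]
      by_cases hpu : c ∈ pyPunctuation
      · have hstep : altStep (out, word) c = (out, word) := by simp [altStep, hd, hpu]
        rw [hstep, ih, hsplit]
        simp [splitAny, filt, hpu]
      · have hstep : altStep (out, word) c = (out, word ++ [c]) := by simp [altStep, hd, hpu]
        rw [hstep, ih, hsplit]
        simp [splitAny, filt, hpu, consW, List.append_assoc]

-- both per-string pipelines compute keepLong ∘ map filt ∘ splitAny pdelim
lemma core_eq (cs : List Char) :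
    (let text := PySem.Chars.splitOn cs [' ']
     let text1 := text.foldl (fun acc j =>
       if PySem.Chars.isIn ['\n'] j then acc ++ PySem.Chars.splitOn j ['\n'] else acc ++ [j]) []
     let text2 := text1.foldl (fun acc j =>
       if PySem.Chars.isIn ['-'] j then acc ++ PySem.Chars.splitOn j ['-'] else acc ++ [j]) []
     let text3 := text2.foldl (fun acc j =>
       acc ++ [pyPunctuation.foldl (fun j car => PySem.Chars.replace j [car] []) j]) []
     let text4 := text3.foldl (fun acc j => if 3 < j.length then acc ++ [j] else acc) []
     text4.map String.ofList)
    = (let st := cs.foldl altStep ([], [])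
       (altFlush st.1 st.2).map String.ofList) := by
  simp only []
  rw [split_branch '\n', split_branch '-', punct_branch, splitOn_single]
  simp only [PySem.List.foldl_append_eq_flatMap,
    List.nil_append, flatMap_splitAny]
  rw [pdelim_eq, keep_foldl, List.nil_append, alt_inv]
  have hK : consW [] (List.map filt (splitAny pdelim cs)) = List.map filt (splitAny pdelim cs) := by
    simp [splitAny, consW]
  rw [hK, List.nil_append, ← List.map_eq_flatMap]

-- ===== VERDICT (by name: the statement is the Claim_ definition above) =====
theorem treatment_spec : Claim_equal_treatment := by
  intro dataX _
  unfold Spec_treatment treatment treatment_alt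
  refine List.map_congr_left ?_
  intro s _
  exact core_eq s.toList
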